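-- pv_equiv track=rewrite | github.com/minhnguyet-UwU/Mellow_Personal-Libray-Website | crawl/test1.py | total_point_of_user
-- ===== SOURCE A (Python) =====
-- def total_point_of_user(submissions, user_id):
--     point = 0
--     problem = {}
--     for i in submissions:
--         if i.get('UserID') == user_id:
--             problem_id = i.get('ProblemID')
--             if problem_id in problem.keys():
--                 if int(i['Point']) > problem[problem_id]:
--                     problem[problem_id] = int(i['Point'])
--             else:
--                 problem[problem_id] = int(i['Point'])
--     for i in list(problem.values()):
--         point += int(i)
--     return point
-- ===== SOURCE B (Python) =====
-- def total_point_of_user(submissions, user_id):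
--     mine = [i for i in submissions if i.get('UserID') == user_id]
--     pids = []
--     for i in mine:
--         if i.get('ProblemID') not in pids:
--             pids.append(i.get('ProblemID'))
--     return sum(max(int(i['Point']) for i in mine if i.get('ProblemID') == pid)
--                for pid in pids)
-- ===== Notes on version B (the rewrite author's own statement) =====
-- stated objective: alternative
-- what changed: Drops A's dict with a running max maintained per key during the scan; B keeps no per-key state at all: it lists the distinct ProblemIDs in first-occurrence order and then, for each, re-scans the user's submissions to take the max -- nested scans (O(n*k)) instead of a single dict pass.
import Mathlib
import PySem

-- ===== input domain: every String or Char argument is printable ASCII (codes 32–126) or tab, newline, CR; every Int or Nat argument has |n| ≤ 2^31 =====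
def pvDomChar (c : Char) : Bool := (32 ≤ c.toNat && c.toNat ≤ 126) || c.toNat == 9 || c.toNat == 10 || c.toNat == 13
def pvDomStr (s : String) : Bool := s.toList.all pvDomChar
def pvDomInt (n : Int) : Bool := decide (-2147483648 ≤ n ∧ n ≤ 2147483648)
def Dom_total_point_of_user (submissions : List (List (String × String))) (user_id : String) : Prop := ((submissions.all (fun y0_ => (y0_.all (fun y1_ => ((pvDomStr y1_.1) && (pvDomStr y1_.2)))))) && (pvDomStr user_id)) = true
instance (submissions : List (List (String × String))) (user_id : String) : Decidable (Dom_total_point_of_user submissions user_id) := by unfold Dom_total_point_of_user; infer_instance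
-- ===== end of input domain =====

-- B keeps no per-key running state: it lists the distinct ProblemIDs of the user's
-- submissions and then re-scans per ProblemID for the max — nested scans instead of
-- A's single dict pass with an inline running max; objective: alternative algorithm.

-- shared helpers: int(i['Point']) and i.get('ProblemID')
-- (Pre_ guarantees 'Point' exists and parses on every matched row, so the .getD 0 default is never hit)
def pvPoint (i : List (String × String)) : Int :=
  ((((PySem.Dict.mk i).get? "Point").bind PySem.Int.ofStr?).getD 0)
def pvPid (i : List (String × String)) : Option String :=
  (PySem.Dict.mk i).get? "ProblemID"

-- ===== PORT A =====
def total_point_of_user (submissions : List (List (String × String))) (user_id : String) : Int :=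
  let problem : PySem.Dict (Option String) Int :=
    submissions.foldl (fun problem i =>
      if (PySem.Dict.mk i).get? "UserID" = some user_id then
        let problem_id := pvPid i
        if problem.contains problem_id then
          if pvPoint i > problem.getD problem_id 0 then problem.insert problem_id (pvPoint i)
          else problem
        else problem.insert problem_id (pvPoint i)
      else problem) PySem.Dict.empty
  problem.values.foldl (fun point v => point + v) 0

-- ===== PORT B =====
def total_point_of_user_alt (submissions : List (List (String × String))) (user_id : String) : Int :=
  let mine := submissions.filter (fun i => decide ((PySem.Dict.mk i).get? "UserID" = some user_id))
  let pids := mine.foldl (fun pids i =>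
      if pvPid i ∈ pids then pids else pids ++ [pvPid i]) ([] : List (Option String))
  (pids.map (fun pid =>
      (PySem.List.max? ((mine.filter (fun i => decide (pvPid i = pid))).map pvPoint)
        (fun y => y)).getD 0)).sum

-- ===== PRECONDITION & SPEC =====
-- Pre_ excludes exactly the inputs where Python A raises (KeyError/ValueError on a matched
-- submission whose 'Point' is missing or not int-parsable); A returns normally everywhere else.
def Pre_total_point_of_user (submissions : List (List (String × String))) (user_id : String) : Prop :=
  ∀ i ∈ submissions, (PySem.Dict.mk i).get? "UserID" = some user_id →
    ∃ s, (PySem.Dict.mk i).get? "Point" = some s ∧ (PySem.Int.ofStr? s).isSome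
instance (submissions : List (List (String × String))) (user_id : String) : Decidable (Pre_total_point_of_user submissions user_id) := by unfold Pre_total_point_of_user; infer_instance

def pvWitness_total_point_of_user : (List (List (String × String))) × String :=
  ([[("UserID", "u1"), ("ProblemID", "p1"), ("Point", "3")],
    [("UserID", "u1"), ("ProblemID", "p1"), ("Point", "7")],
    [("UserID", "u2"), ("ProblemID", "p2")]], "u1")

def Spec_total_point_of_user (submissions : List (List (String × String))) (user_id : String) (out : Int) : Prop := out = total_point_of_user_alt submissions user_id
instance (submissions : List (List (String × String))) (user_id : String) (out : Int) : Decidable (Spec_total_point_of_user submissions user_id out) := by unfold Spec_total_point_of_user; infer_instance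

-- ===== CLAIM (what is proved, stated in full; the proofs are below) =====
def Claim_equal_total_point_of_user : Prop := ∀ (submissions : List (List (String × String))) (user_id : String), Dom_total_point_of_user submissions user_id → Pre_total_point_of_user submissions user_id → Spec_total_point_of_user submissions user_id (total_point_of_user submissions user_id)

-- ===== LEMMAS AND PROOFS =====

-- A's loop body with the user guard stripped (the guard becomes a filter via foldl_ite_eq_foldl_filter)
def pvStep (d : PySem.Dict (Option String) Int) (i : List (String × String)) : PySem.Dict (Option String) Int :=
  if d.contains (pvPid i) then
    if pvPoint i > d.getD (pvPid i) 0 then d.insert (pvPid i) (pvPoint i) else d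
  else d.insert (pvPid i) (pvPoint i)

-- B's per-ProblemID maximum over a list of rows
def pvMax (l : List (List (String × String))) (pid : Option String) : Option Int :=
  PySem.List.max? ((l.filter (fun i => decide (pvPid i = pid))).map pvPoint) (fun y => y)

-- B's distinct-ProblemID list of a list of rows
def pvPids (l : List (List (String × String))) : List (Option String) :=
  l.foldl (fun pids i => if pvPid i ∈ pids then pids else pids ++ [pvPid i]) []

-- invariant tying A's dict after a prefix to B's two-phase reading of that prefix
def pvInv (pref : List (List (String × String))) (d : PySem.Dict (Option String) Int) : Prop :=
  d.keys = pvPids pref ∧ ∀ pid, d.get? pid = pvMax pref pid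

theorem pvMax_append (pref : List (List (String × String))) (i : List (String × String)) (pid : Option String) :
    pvMax (pref ++ [i]) pid =
      if pvPid i = pid then
        PySem.List.max? (((pref.filter (fun j => decide (pvPid j = pid))).map pvPoint) ++ [pvPoint i]) (fun y => y)
      else pvMax pref pid := by
  unfold pvMax
  rw [List.filter_append]
  split_ifs with h <;> simp [h]

theorem pvPids_append (pref : List (List (String × String))) (i : List (String × String)) :
    pvPids (pref ++ [i]) =
      if pvPid i ∈ pvPids pref then pvPids pref else pvPids pref ++ [pvPid i] := by
  unfold pvPids
  rw [List.foldl_append]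
  rfl

theorem pvInv_step (pref : List (List (String × String))) (d : PySem.Dict (Option String) Int)
    (i : List (String × String)) (h : pvInv pref d) : pvInv (pref ++ [i]) (pvStep d i) := by
  obtain ⟨hk, hg⟩ := h
  have hcont : d.contains (pvPid i) = (pvMax pref (pvPid i)).isSome := by
    rw [PySem.Dict.contains_eq_isSome_get?, hg]
  unfold pvStep
  cases hm : pvMax pref (pvPid i) with
  | none =>
    have hc : d.contains (pvPid i) = false := by rw [hcont, hm]; rfl
    have hnil : (pref.filter (fun j => decide (pvPid j = pvPid i))).map pvPoint = [] :=
      (PySem.List.max?_eq_none_iff _ _).mp (by rw [← pvMax]; exact hm)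
    have hnm : pvPid i ∉ pvPids pref := by
      rw [← hk]; intro hmem
      rw [(PySem.Dict.contains_iff_mem_keys d (pvPid i)).2 hmem] at hc; exact absurd hc (by simp)
    rw [if_neg (by simp [hc])]
    constructor
    · rw [PySem.Dict.keys_insert_of_not_contains _ _ hc, hk, pvPids_append, if_neg hnm]
    · intro pid
      rw [pvMax_append]
      by_cases hpid : pvPid i = pid
      · subst hpid
        rw [if_pos rfl, hnil, PySem.Dict.get?_insert_self]
        simp [PySem.List.max?_id_cons]
      · rw [if_neg hpid, PySem.Dict.get?_insert_of_ne _ _ (fun e => hpid e.symm), hg]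
  | some m =>
    have hc : d.contains (pvPid i) = true := by rw [hcont, hm]; rfl
    have hgd : d.getD (pvPid i) 0 = m := by
      rw [PySem.Dict.getD_eq_get?_getD, hg, hm]; rfl
    -- the old mapped list is nonempty; destructure it to use max?_id_cons
    obtain ⟨x, t, hxt⟩ : ∃ x t, (pref.filter (fun j => decide (pvPid j = pvPid i))).map pvPoint = x :: t := by
      cases hL : (pref.filter (fun j => decide (pvPid j = pvPid i))).map pvPoint with
      | nil =>
        have : pvMax pref (pvPid i) = none := by unfold pvMax; rw [hL]; exact (PySem.List.max?_eq_none_iff _ _).mpr rfl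
        rw [this] at hm; cases hm
      | cons x t => exact ⟨x, t, rfl⟩
    have hmval : m = t.foldl max x := by
      have := hm
      unfold pvMax at this
      rw [hxt, PySem.List.max?_id_cons] at this
      exact (Option.some.inj this).symm
    have hnew : pvMax (pref ++ [i]) (pvPid i) = some (max m (pvPoint i)) := by
      rw [pvMax_append, if_pos rfl, hxt]
      show PySem.List.max? (x :: (t ++ [pvPoint i])) (fun y => y) = _
      rw [PySem.List.max?_id_cons, List.foldl_append]
      simp [hmval]
    have hmem : pvPid i ∈ pvPids pref := by
      rw [← hk]; exact (PySem.Dict.contains_iff_mem_keys d (pvPid i)).1 hc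
    rw [if_pos hc]
    constructor
    · have hkeep : (if pvPoint i > d.getD (pvPid i) 0 then d.insert (pvPid i) (pvPoint i) else d).keys = d.keys := by
        split_ifs
        · exact PySem.Dict.keys_insert_of_contains _ _ hc
        · rfl
      rw [hkeep, hk, pvPids_append, if_pos hmem]
    · intro pid
      by_cases hpid : pvPid i = pid
      · subst hpid
        rw [hnew, hgd]
        split_ifs with hgt
        · rw [PySem.Dict.get?_insert_self, max_eq_right (le_of_lt hgt)]
        · rw [hg, hm, max_eq_left (by omega)]
      · have hother : (if pvPoint i > d.getD (pvPid i) 0 then d.insert (pvPid i) (pvPoint i) else d).get? pid = d.get? pid := by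
          split_ifs
          · exact PySem.Dict.get?_insert_of_ne _ _ (fun e => hpid e.symm)
          · rfl
        rw [hother, hg, pvMax_append, if_neg hpid]


theorem pvInv_fold (rest pref : List (List (String × String))) (d : PySem.Dict (Option String) Int)
    (h : pvInv pref d) : pvInv (pref ++ rest) (rest.foldl pvStep d) := by
  induction rest generalizing pref d with
  | nil => simpa using h
  | cons i r ih =>
    have : pref ++ i :: r = (pref ++ [i]) ++ r := by simp
    rw [this, List.foldl_cons]
    exact ih (pref ++ [i]) (pvStep d i) (pvInv_step pref d i h)

theorem pvPids_nodup_aux (l : List (List (String × String))) (acc : List (Option String)) (h : acc.Nodup) :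
    (l.foldl (fun pids i => if pvPid i ∈ pids then pids else pids ++ [pvPid i]) acc).Nodup := by
  induction l generalizing acc with
  | nil => exact h
  | cons i r ih =>
    rw [List.foldl_cons]
    split_ifs with hmem
    · exact ih acc h
    · refine ih _ ?_
      simp only [List.nodup_append, List.nodup_cons, List.not_mem_nil, not_false_iff, List.nodup_nil, and_true, true_and]
      refine ⟨h, ?_⟩
      intro a ha b hb e
      rw [List.mem_singleton] at hb
      exact hmem (hb ▸ e ▸ ha)

-- ===== VERDICT (by name: the statement is the Claim_ definition above) =====
theorem total_point_of_user_spec : Claim_equal_total_point_of_user := by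
  intro submissions user_id _ _
  unfold Spec_total_point_of_user total_point_of_user total_point_of_user_alt
  rw [PySem.List.foldl_ite_eq_foldl_filter]
  set mine := submissions.filter (fun i => decide ((PySem.Dict.mk i).get? "UserID" = some user_id)) with hmine
  have hbody : mine.foldl (fun problem i =>
      let problem_id := pvPid i
      if problem.contains problem_id then
        if pvPoint i > problem.getD problem_id 0 then problem.insert problem_id (pvPoint i)
        else problem
      else problem.insert problem_id (pvPoint i)) PySem.Dict.empty = mine.foldl pvStep PySem.Dict.empty := rfl
  rw [hbody]
  have hinv : pvInv mine (mine.foldl pvStep PySem.Dict.empty) := by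
    have h0 : pvInv [] (PySem.Dict.empty : PySem.Dict (Option String) Int) := by
      constructor
      · simp [pvPids, PySem.Dict.keys_empty]
      · intro pid
        rw [PySem.Dict.get?_empty]
        exact ((PySem.List.max?_eq_none_iff _ _).mpr rfl).symm
    simpa using pvInv_fold mine [] PySem.Dict.empty h0
  obtain ⟨hk, hg⟩ := hinv
  have hnd : (mine.foldl pvStep PySem.Dict.empty).keys.Nodup := by
    rw [hk]; exact pvPids_nodup_aux mine [] List.nodup_nil
  have hmap : (pvPids mine).map (fun k => (mine.foldl pvStep PySem.Dict.empty).getD k 0)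
      = (pvPids mine).map (fun pid => (pvMax mine pid).getD 0) :=
    List.map_congr_left (fun k _ => by rw [PySem.Dict.getD_eq_get?_getD, hg k])
  show (mine.foldl pvStep PySem.Dict.empty).values.foldl (fun point v => point + v) 0
      = ((pvPids mine).map (fun pid => (pvMax mine pid).getD 0)).sum
  rw [PySem.Dict.values_eq_map_keys _ hnd 0, hk, hmap, List.sum_eq_foldl]
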